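-- pv_equiv track=rewrite | github.com/franklinkong981/Python-DS-Exercise | python-ds-practice/24_remove_every_other/remove_every_other.py | remove_every_other
-- ===== SOURCE A (Python) =====
-- def remove_every_other(lst):
--     """Return a new list of other item.
--
--         >>> lst = [1, 2, 3, 4, 5]
--
--         >>> remove_every_other(lst)
--         [1, 3, 5]
--
--     This should return a list, not mutate the original:
--
--         >>> lst
--         [1, 2, 3, 4, 5]
--     """
--     every_other_list = []
--     current_index = 0
--     for number in lst:
--         if current_index % 2 == 0:
--             every_other_list.append(number)
--         current_index += 1
--     return every_other_list
-- ===== SOURCE B (Python) =====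
-- def remove_every_other(lst):
--     """Return a new list containing every other item of lst (indices 0, 2, 4, ...)."""
--     return list(lst[::2])
-- ===== Notes on version B (the rewrite author's own statement) =====
-- stated objective: idiomatic
-- what changed: Replaced the explicit loop with a manual index counter and parity test by a single closed-form extended slice lst[::2].
import Mathlib
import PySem

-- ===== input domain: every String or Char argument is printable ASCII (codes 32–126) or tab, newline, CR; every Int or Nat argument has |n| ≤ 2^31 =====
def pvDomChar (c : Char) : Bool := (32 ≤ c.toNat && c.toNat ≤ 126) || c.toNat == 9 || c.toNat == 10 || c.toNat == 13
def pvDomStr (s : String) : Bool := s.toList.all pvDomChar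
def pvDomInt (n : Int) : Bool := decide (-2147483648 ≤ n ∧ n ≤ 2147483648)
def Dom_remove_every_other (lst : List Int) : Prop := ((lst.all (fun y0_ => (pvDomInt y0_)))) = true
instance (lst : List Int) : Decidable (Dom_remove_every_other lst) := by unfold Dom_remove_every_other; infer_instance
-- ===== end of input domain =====

-- B replaces A's loop + index counter + parity test by the closed-form extended slice lst[::2] (idiomatic, no bug fixed, same cost).

-- ===== PORT A =====
-- for number in lst: if current_index % 2 == 0: append; current_index += 1
def remove_every_other (lst : List Int) : List Int :=
  (lst.foldl
    (fun (st : List Int × Int) number =>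
      (if st.2 % 2 = 0 then st.1 ++ [number] else st.1, st.2 + 1))
    ([], 0)).1

-- ===== PORT B =====
-- list(lst[::2]); the step 2 is never 0, so slice? always returns some
def remove_every_other_alt (lst : List Int) : List Int :=
  match PySem.List.slice? lst none none 2 with
  | some r => r
  | none => []

-- ===== PRECONDITION & SPEC =====
def Spec_remove_every_other (lst : List Int) (out : List Int) : Prop := out = remove_every_other_alt lst
instance (lst : List Int) (out : List Int) : Decidable (Spec_remove_every_other lst out) := by unfold Spec_remove_every_other; infer_instance

-- ===== CLAIM (what is proved, stated in full; the proofs are below) =====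
def Claim_equal_remove_every_other : Prop := ∀ (lst : List Int), Dom_remove_every_other lst → Spec_remove_every_other lst (remove_every_other lst)

-- ===== LEMMAS AND PROOFS =====

-- reference "every other element" recursion, proof-only
def pvEO : List Int → List Int
  | [] => []
  | [a] => [a]
  | a :: _ :: t => a :: pvEO t

theorem pvA_foldl (l : List Int) : ∀ (acc : List Int) (i : Int), i % 2 = 0 →
    (l.foldl
      (fun (st : List Int × Int) number =>
        (if st.2 % 2 = 0 then st.1 ++ [number] else st.1, st.2 + 1))
      (acc, i)).1 = acc ++ pvEO l := by
  induction l using pvEO.induct with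
  | case1 => simp [pvEO]
  | case2 a => intro acc i hi; simp [List.foldl, pvEO, hi]
  | case3 a b t ih =>
    intro acc i hi
    have h1 : (i + 1) % 2 ≠ 0 := by omega
    have h2 : (i + 1 + 1) % 2 = 0 := by omega
    simp only [List.foldl, hi, if_pos, if_neg h1]
    rw [ih (acc ++ [a]) (i + 1 + 1) h2]
    simp [pvEO]

theorem pvB_key : ∀ (l : List Int),
    List.filterMap (fun (k : ℕ) => l[(2 * (k : Int)).toNat]?) (List.range ((l.length + 1) / 2)) = pvEO l := by
  intro l
  induction l using pvEO.induct with
  | case1 => simp [pvEO]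
  | case2 a => simp [pvEO]
  | case3 a b t ih =>
    have hcnt : ((a :: b :: t).length + 1) / 2 = (t.length + 1) / 2 + 1 := by
      simp only [List.length_cons]; omega
    rw [hcnt, List.range_succ_eq_map]
    simp only [List.filterMap_cons, List.filterMap_map]
    have h0 : ((2 : Int) * ((0 : ℕ) : Int)).toNat = 0 := by norm_num
    have hcomp : ((fun (k : ℕ) => (a :: b :: t)[(2 * (k : Int)).toNat]?) ∘ Nat.succ)
        = fun (k : ℕ) => t[(2 * (k : Int)).toNat]? := by
      funext k
      have e1 : ((2 : Int) * ((Nat.succ k : ℕ) : Int)).toNat = 2 * k + 2 := by push_cast; omega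
      simp only [Function.comp_apply, e1]
      rfl
    simp only [h0, List.getElem?_cons_zero, hcomp, ih]
    simp [pvEO]

theorem pvB_eq (l : List Int) : remove_every_other_alt l = pvEO l := by
  unfold remove_every_other_alt
  simp only [PySem.List.slice?, PySem.List.sliceIndices]
  norm_num
  have hc : (if 0 < l.length then (((l.length : Int) + 2 - 1) / 2).toNat else 0) = (l.length + 1) / 2 := by
    split <;> omega
  rw [hc]
  exact pvB_key l

-- ===== VERDICT (by name: the statement is the Claim_ definition above) =====
theorem remove_every_other_spec : Claim_equal_remove_every_other := by
  intro lst _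
  unfold Spec_remove_every_other remove_every_other
  rw [pvB_eq]
  simpa using pvA_foldl lst [] 0 rfl
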